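-- pv_equiv track=rewrite | github.com/Soreseth/Masterthesis | src/utils/aggregate.py | _parse_feature_groups_for_lda
-- ===== SOURCE A (Python) =====
-- from collections import defaultdict
--
-- def _parse_feature_groups_for_lda(feature_keys):
--     """
--     Parse feature names to identify groups by prefix for LDA.
--
--     Groups are identified by common prefixes like:
--     - renyi_05_*, renyi_2_*, renyi_inf_*
--     - min_k_*, min_k_plus_*
--     - ref_loss_*, wbc_*, tl_informia_*
--     - recall_*, conrecall_*
--     """
--     groups = defaultdict(list)
--     singletons = []
--
--     group_patterns = [
--         ('ref_loss_', 'ref_loss'),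
--         ('wbc_', 'wbc'),
--         ('tl_informia_', 'tl_informia'),
--         ('renyi_05_', 'renyi_05'),
--         ('renyi_2_', 'renyi_2'),
--         ('renyi_inf_', 'renyi_inf'),
--         ('min_k_plus_', 'min_k_plus'),
--         ('min_k_', 'min_k'),
--         ('conrecall_', 'conrecall'),
--         ('recall_', 'recall'),
--         ('entropies_', 'entropies'),
--         ('modified_entropies_', 'modified_entropies'),
--         ('gap_prob_', 'gap_prob'),
--         ('camia_', 'camia'),
--         ('acmia_', 'acmia'),
--         ('noisy_', 'noisy'),
--         ('tag_tab_', 'tag_tab'),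
--         ('dc_pdd_', 'dc_pdd'),
--     ]
--
--     for key in feature_keys:
--         matched = False
--         for prefix, group_name in group_patterns:
--             if key.startswith(prefix):
--                 groups[group_name].append(key)
--                 matched = True
--                 break
--         if not matched:
--             singletons.append(key)
--
--     return dict(groups), singletons
-- ===== SOURCE B (Python) =====
-- _GROUP_PATTERNS = [
--     ('ref_loss_', 'ref_loss'),
--     ('wbc_', 'wbc'),
--     ('tl_informia_', 'tl_informia'),
--     ('renyi_05_', 'renyi_05'),
--     ('renyi_2_', 'renyi_2'),
--     ('renyi_inf_', 'renyi_inf'),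
--     ('min_k_plus_', 'min_k_plus'),
--     ('min_k_', 'min_k'),
--     ('conrecall_', 'conrecall'),
--     ('recall_', 'recall'),
--     ('entropies_', 'entropies'),
--     ('modified_entropies_', 'modified_entropies'),
--     ('gap_prob_', 'gap_prob'),
--     ('camia_', 'camia'),
--     ('acmia_', 'acmia'),
--     ('noisy_', 'noisy'),
--     ('tag_tab_', 'tag_tab'),
--     ('dc_pdd_', 'dc_pdd'),
-- ]
--
--
-- def _parse_feature_groups_for_lda(feature_keys):
--     """Longest-prefix-match regrouping: instead of first-match over a
--     specificity-ordered pattern list, pick the matching pattern with the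
--     longest prefix (order of the pattern list becomes irrelevant)."""
--     groups = {}
--     singletons = []
--     for key in feature_keys:
--         best = None  # (prefix_length, group_name) of longest matching prefix
--         for prefix, group_name in _GROUP_PATTERNS:
--             if key.startswith(prefix) and (best is None or best[0] < len(prefix)):
--                 best = (len(prefix), group_name)
--         if best is None:
--             singletons.append(key)
--         else:
--             groups[best[1]] = groups.get(best[1], []) + [key]
--     return groups, singletons
-- ===== Notes on version B (the rewrite author's own statement) =====
-- stated objective: alternative
-- what changed: Replaced first-match over a specificity-ordered pattern list (inner loop with break) by an order-independent longest-prefix-match scan that tracks the best (longest) matching prefix, and builds groups with a plain dict instead of a defaultdict.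
import Mathlib
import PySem

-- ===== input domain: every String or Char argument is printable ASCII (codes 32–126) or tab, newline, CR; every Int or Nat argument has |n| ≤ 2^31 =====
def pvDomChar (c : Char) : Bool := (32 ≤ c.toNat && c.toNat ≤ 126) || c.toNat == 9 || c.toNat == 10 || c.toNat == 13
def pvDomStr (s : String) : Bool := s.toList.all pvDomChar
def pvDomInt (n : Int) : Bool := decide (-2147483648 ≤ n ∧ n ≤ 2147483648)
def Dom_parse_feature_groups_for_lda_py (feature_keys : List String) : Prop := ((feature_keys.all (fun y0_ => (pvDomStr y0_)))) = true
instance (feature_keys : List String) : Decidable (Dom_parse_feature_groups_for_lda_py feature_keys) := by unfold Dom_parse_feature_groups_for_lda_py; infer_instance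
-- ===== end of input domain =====

-- B replaces A's first-match over a specificity-ordered pattern list by a longest-prefix-match
-- scan that is independent of the pattern list's order (objective: alternative decomposition).

-- ===== PORT A =====
-- the shared literal pattern table (group_patterns in both Pythons)
def pvPatterns : List (String × String) :=
  [("ref_loss_", "ref_loss"), ("wbc_", "wbc"), ("tl_informia_", "tl_informia"),
   ("renyi_05_", "renyi_05"), ("renyi_2_", "renyi_2"), ("renyi_inf_", "renyi_inf"),
   ("min_k_plus_", "min_k_plus"), ("min_k_", "min_k"), ("conrecall_", "conrecall"),
   ("recall_", "recall"), ("entropies_", "entropies"),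
   ("modified_entropies_", "modified_entropies"), ("gap_prob_", "gap_prob"),
   ("camia_", "camia"), ("acmia_", "acmia"), ("noisy_", "noisy"),
   ("tag_tab_", "tag_tab"), ("dc_pdd_", "dc_pdd")]

-- A's inner 'for prefix, group_name … if key.startswith(prefix): …; break' loop:
-- the first matching pattern's group name (none ↔ matched stays False)
def pvFirstMatch (key : String) : List (String × String) → Option String
  | [] => none
  | (prefix_, group_name) :: rest =>
      if PySem.Str.startswith key prefix_ then some group_name else pvFirstMatch key rest

def parse_feature_groups_for_lda_py (feature_keys : List String) :
    (List (String × List String)) × List String :=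
  let st := feature_keys.foldl
    (fun (st : PySem.Dict String (List String) × List String) key =>
      match pvFirstMatch key pvPatterns with
      | some group_name => (st.1.modify group_name [] (· ++ [key]), st.2)   -- defaultdict append
      | none => (st.1, st.2 ++ [key]))
    (PySem.Dict.empty, [])
  (st.1.items, st.2)

-- ===== PORT B =====
-- Source B's inner scan: best = (prefix_length, group_name) of the longest matching prefix
def pvBestMatch (key : String) : Option (Int × String) :=
  pvPatterns.foldl
    (fun best (p : String × String) =>
      if PySem.Str.startswith key p.1 &&
         (match best with | none => true | some b => decide (b.1 < PySem.Str.len p.1)) then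
        some (PySem.Str.len p.1, p.2)
      else best)
    none

def parse_feature_groups_for_lda_py_alt (feature_keys : List String) :
    (List (String × List String)) × List String :=
  let st := feature_keys.foldl
    (fun (st : PySem.Dict String (List String) × List String) key =>
      match pvBestMatch key with
      | none => (st.1, st.2 ++ [key])
      | some best => (st.1.insert best.2 (st.1.getD best.2 [] ++ [key]), st.2))
    (PySem.Dict.empty, [])
  (st.1.items, st.2)

-- ===== PRECONDITION & SPEC =====
def Spec_parse_feature_groups_for_lda_py (feature_keys : List String) (out : (List (String × List String)) × List String) : Prop := out = parse_feature_groups_for_lda_py_alt feature_keys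
instance (feature_keys : List String) (out : (List (String × List String)) × List String) : Decidable (Spec_parse_feature_groups_for_lda_py feature_keys out) := by unfold Spec_parse_feature_groups_for_lda_py; infer_instance

-- ===== CLAIM (what is proved, stated in full; the proofs are below) =====
def Claim_equal_parse_feature_groups_for_lda_py : Prop := ∀ (feature_keys : List String), Dom_parse_feature_groups_for_lda_py feature_keys → Spec_parse_feature_groups_for_lda_py feature_keys (parse_feature_groups_for_lda_py feature_keys)

-- ===== LEMMAS AND PROOFS =====

-- the generic longest-prefix fold over any tail of patterns
def pvScan (key : String) (P : List (String × String)) (acc : Option (Int × String)) :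
    Option (Int × String) :=
  P.foldl
    (fun best (p : String × String) =>
      if PySem.Str.startswith key p.1 &&
         (match best with | none => true | some b => decide (b.1 < PySem.Str.len p.1)) then
        some (PySem.Str.len p.1, p.2)
      else best)
    acc

theorem pvBestMatch_eq_scan (key : String) : pvBestMatch key = pvScan key pvPatterns none := rfl

-- once an accumulator at least as long as every later match is set, the scan keeps it
theorem pvScan_keep (key : String) (P : List (String × String)) (l : Int) (g : String)
    (h : ∀ p ∈ P, PySem.Str.startswith key p.1 = true → PySem.Str.len p.1 ≤ l) :
    pvScan key P (some (l, g)) = some (l, g) := by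
  induction P with
  | nil => rfl
  | cons p rest ih =>
      have h1 := h p (List.mem_cons_self)
      have hcond : (PySem.Str.startswith key p.1 &&
          (match (some (l, g) : Option (Int × String)) with
           | none => true | some b => decide (b.1 < PySem.Str.len p.1))) = false := by
        cases hs : PySem.Str.startswith key p.1 with
        | false => rfl
        | true =>
            have hnl : ¬ l < PySem.Str.len p.1 := Int.not_lt.mpr (h1 hs)
            simp only [Bool.true_and, decide_eq_false hnl]
      simp only [pvScan, List.foldl_cons, hcond, Bool.false_eq_true, if_false]
      exact ih (fun q hq => h q (List.mem_cons_of_mem _ hq))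

-- no earlier pattern's prefix is a prefix of a later one ⇒ first match = longest match
theorem pvScan_eq_firstMatch (key : String) (P : List (String × String))
    (hp : P.Pairwise (fun a b => ¬ (a.1.toList <+: b.1.toList))) :
    (pvScan key P none).map Prod.snd = pvFirstMatch key P := by
  induction P with
  | nil => rfl
  | cons p rest ih =>
      obtain ⟨p1, p2⟩ := p
      rcases List.pairwise_cons.mp hp with ⟨hhead, htail⟩
      by_cases hs : PySem.Str.startswith key p1 = true
      · have hkey : p1.toList <+: key.toList :=
          (PySem.Chars.startswith_iff key.toList p1.toList).mp
            (by rw [← PySem.Str.startswith_eq]; exact hs)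
        have hbound : ∀ q ∈ rest, PySem.Str.startswith key q.1 = true →
            PySem.Str.len q.1 ≤ PySem.Str.len p1 := by
          intro q hq hqs
          have hqkey : q.1.toList <+: key.toList :=
            (PySem.Chars.startswith_iff key.toList q.1.toList).mp
              (by rw [← PySem.Str.startswith_eq]; exact hqs)
          by_contra hlt
          have hlen : p1.toList.length ≤ q.1.toList.length := by
            have e1 := PySem.Str.len_eq p1
            have e2 := PySem.Str.len_eq q.1
            omega
          exact hhead q hq (List.prefix_of_prefix_length_le hkey hqkey hlen)
        have hcond : (PySem.Str.startswith key p1 &&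
            (match (none : Option (Int × String)) with
             | none => true | some b => decide (b.1 < PySem.Str.len p1))) = true := by
          rw [hs]; rfl
        simp only [pvScan, List.foldl_cons, hcond, if_pos]
        have hk : pvScan key rest (some (PySem.Str.len p1, p2)) =
            some (PySem.Str.len p1, p2) := pvScan_keep key rest _ _ hbound
        simp only [pvScan] at hk
        rw [hk]
        simp only [Option.map_some, pvFirstMatch, hs, if_pos]
      · simp only [Bool.not_eq_true] at hs
        have hcond : (PySem.Str.startswith key p1 &&
            (match (none : Option (Int × String)) with
             | none => true | some b => decide (b.1 < PySem.Str.len p1))) = false := by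
          rw [hs]; rfl
        simp only [pvScan, List.foldl_cons, hcond, Bool.false_eq_true, if_false]
        have hi := ih htail
        simp only [pvScan] at hi
        rw [hi]
        simp only [pvFirstMatch, hs, Bool.false_eq_true, if_false]

theorem pvPatterns_pairwise :
    pvPatterns.Pairwise (fun a b => ¬ (a.1.toList <+: b.1.toList)) := by decide

-- the two per-key selectors agree
theorem pvSel_eq (key : String) :
    (pvBestMatch key).map Prod.snd = pvFirstMatch key pvPatterns := by
  rw [pvBestMatch_eq_scan]
  exact pvScan_eq_firstMatch key pvPatterns pvPatterns_pairwise

-- the two per-key fold steps agree on every state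
theorem pvStep_eq (st : PySem.Dict String (List String) × List String) (key : String) :
    (match pvFirstMatch key pvPatterns with
     | some group_name => (st.1.modify group_name [] (· ++ [key]), st.2)
     | none => (st.1, st.2 ++ [key])) =
    (match pvBestMatch key with
     | none => (st.1, st.2 ++ [key])
     | some best => (st.1.insert best.2 (st.1.getD best.2 [] ++ [key]), st.2)) := by
  rw [← pvSel_eq key]
  cases pvBestMatch key with
  | none => rfl
  | some best =>
      simp only [Option.map_some]
      have : st.1.modify best.2 [] (· ++ [key]) =
          st.1.insert best.2 (st.1.getD best.2 [] ++ [key]) := PySem.Dict.ext_iff.mpr rfl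
      rw [this]

-- ===== VERDICT (by name: the statement is the Claim_ definition above) =====
theorem parse_feature_groups_for_lda_py_spec : Claim_equal_parse_feature_groups_for_lda_py := by
  intro feature_keys _
  unfold Spec_parse_feature_groups_for_lda_py
  unfold parse_feature_groups_for_lda_py parse_feature_groups_for_lda_py_alt
  have : feature_keys.foldl
      (fun (st : PySem.Dict String (List String) × List String) key =>
        match pvFirstMatch key pvPatterns with
        | some group_name => (st.1.modify group_name [] (· ++ [key]), st.2)
        | none => (st.1, st.2 ++ [key]))
      (PySem.Dict.empty, []) =
    feature_keys.foldl
      (fun (st : PySem.Dict String (List String) × List String) key =>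
        match pvBestMatch key with
        | none => (st.1, st.2 ++ [key])
        | some best => (st.1.insert best.2 (st.1.getD best.2 [] ++ [key]), st.2))
      (PySem.Dict.empty, []) := by
    apply PySem.List.foldl_congr_mem
    intro st key _
    exact pvStep_eq st key
  simp only [this]
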